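-- pv_equiv track=rewrite | github.com/JH-TT/Coding_Practice | Programmers/Two_Pointer_P/131127.py | solution
-- ===== SOURCE A (Python) =====
-- from collections import defaultdict
-- from collections import defaultdict
--
-- def solution(want, number, discount):
--     answer = 0
--     cnt = defaultdict(int)
--     valid = defaultdict(int)
--     for w, n in zip(want, number):
--         cnt[w] = n
--         valid[w] = 1
--     total_ = len(want)
--     for i in range(10):
--         if discount[i] in want:
--             cnt[discount[i]] -= 1
--             if cnt[discount[i]] == 0:
--                 total_ -= 1
--     # (i+1)일차
--     for i in range(len(discount)-10):
--         if total_ == 0: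
--             answer += 1
--         if valid[discount[i]]:
--             cnt[discount[i]] += 1
--             # 다시 생긴 경우
--             if cnt[discount[i]] == 1:
--                 total_ += 1
--         if valid[discount[i+10]]:
--             cnt[discount[i+10]] -= 1
--             # 전부 구매 가능해진 경우
--             if cnt[discount[i+10]] == 0:
--                 total_ -= 1
--     if total_ == 0:
--         answer += 1
--
--     return answer
-- ===== SOURCE B (Python) =====
-- def solution(want, number, discount):
--     """Count the days whose 10-day discount window covers the whole wishlist."""
--     if len(discount) < 10:
--         raise ValueError("the discount schedule must cover at least 10 days")
--     wishlist = list(zip(want, number))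
--     days = 0
--     for i in range(len(discount) - 9):
--         window = discount[i:i + 10]
--         stocked = {w for w, n in wishlist if 0 < n <= window.count(w)}
--         if len(stocked) == len(want):
--             days += 1
--     return days
-- ===== Notes on version B (the rewrite author's own statement) =====
-- stated objective: simpler
-- what changed: Replaces A's incremental sliding-window counter/total bookkeeping with a direct per-window recount: for each 10-day window, collect the set of wishlist items stocked in at least their (positive) wanted amount and count the day when that set covers the whole wishlist; schedules shorter than 10 days (where A raises IndexError and B raises ValueError) are excluded by Pre_.
import Mathlib
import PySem

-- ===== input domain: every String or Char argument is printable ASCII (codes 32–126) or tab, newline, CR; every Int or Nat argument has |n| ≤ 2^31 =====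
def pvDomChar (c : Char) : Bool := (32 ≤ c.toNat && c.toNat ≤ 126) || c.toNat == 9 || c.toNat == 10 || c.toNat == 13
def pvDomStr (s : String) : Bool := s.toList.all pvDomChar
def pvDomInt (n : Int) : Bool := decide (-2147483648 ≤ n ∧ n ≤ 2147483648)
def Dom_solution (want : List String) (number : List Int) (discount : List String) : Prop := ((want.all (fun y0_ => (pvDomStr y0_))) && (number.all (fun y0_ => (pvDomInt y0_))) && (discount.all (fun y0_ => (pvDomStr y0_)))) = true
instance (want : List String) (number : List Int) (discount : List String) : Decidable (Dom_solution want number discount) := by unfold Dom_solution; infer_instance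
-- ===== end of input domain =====

-- B replaces A's incremental sliding counters with a direct per-window recount (a set of
-- stocked wishlist items per 10-day window); equivalence is proved for len(discount) ≥ 10
-- (below 10 A's initial loop raises IndexError).

-- ===== PORT A =====
def solution (want : List String) (number : List Int) (discount : List String) : Int :=
  let pairs := want.zip number
  let init :=
    pairs.foldl
      (fun (s : PySem.Dict String Int × PySem.Dict String Int) p =>
        (s.1.insert p.1 p.2, s.2.insert p.1 1))
      (PySem.Dict.empty, PySem.Dict.empty)
  let valid := init.2
  let s1 :=
    (PySem.List.pyRange 0 10 1).foldl
      (fun (s : PySem.Dict String Int × Int) i =>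
        let x := PySem.List.pyGetD discount i ""
        if x ∈ want then
          let c := s.1.modify x 0 (fun v => v - 1)
          (c, if c.getD x 0 = 0 then s.2 - 1 else s.2)
        else s)
      (init.1, PySem.List.len want)
  let s2 :=
    (PySem.List.pyRange 0 (PySem.List.len discount - 10) 1).foldl
      (fun (s : Int × PySem.Dict String Int × Int) i =>
        let a := if s.2.2 = 0 then s.1 + 1 else s.1
        let x := PySem.List.pyGetD discount i ""
        let t1 :=
          if valid.getD x 0 ≠ 0 then
            let c := s.2.1.modify x 0 (fun v => v + 1)
            (c, if c.getD x 0 = 1 then s.2.2 + 1 else s.2.2)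
          else (s.2.1, s.2.2)
        let y := PySem.List.pyGetD discount (i + 10) ""
        let t2 :=
          if valid.getD y 0 ≠ 0 then
            let c := t1.1.modify y 0 (fun v => v - 1)
            (c, if c.getD y 0 = 0 then t1.2 - 1 else t1.2)
          else t1
        (a, t2.1, t2.2))
      (0, s1.1, s1.2)
  if s2.2.2 = 0 then s2.1 + 1 else s2.1

-- ===== PORT B =====
def solution_alt (want : List String) (number : List Int) (discount : List String) : Int :=
  let wishlist := want.zip number
  (PySem.List.pyRange 0 (PySem.List.len discount - 9) 1).foldl
    (fun days i =>
      let window := PySem.List.slice discount (some i) (some (i + 10))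
      let stocked := PySem.Set.ofList ((wishlist.filter
          (fun p => decide (0 < p.2 ∧ p.2 ≤ (window.count p.1 : Int)))).map Prod.fst)
      if PySem.List.len stocked = PySem.List.len want then days + 1 else days)
    0

-- ===== PRECONDITION & SPEC =====
-- Pre_ excludes exactly len(discount) < 10, where A's initial 10-day loop raises IndexError.
def Pre_solution (want : List String) (number : List Int) (discount : List String) : Prop :=
  10 ≤ PySem.List.len discount
instance (want : List String) (number : List Int) (discount : List String) :
    Decidable (Pre_solution want number discount) := by unfold Pre_solution; infer_instance

def pvWitness_solution : List String × List Int × List String :=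
  (["a", "b"], [2, 1],
   ["a", "a", "b", "c", "c", "c", "c", "c", "c", "c", "a", "b"])

def Spec_solution (want : List String) (number : List Int) (discount : List String) (out : Int) : Prop := out = solution_alt want number discount
instance (want : List String) (number : List Int) (discount : List String) (out : Int) : Decidable (Spec_solution want number discount out) := by unfold Spec_solution; infer_instance

-- ===== CLAIM (what is proved, stated in full; the proofs are below) =====
def Claim_equal_solution : Prop := ∀ (want : List String) (number : List Int) (discount : List String), Dom_solution want number discount → Pre_solution want number discount → Spec_solution want number discount (solution want number discount)

-- ===== LEMMAS AND PROOFS =====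

def pvF (a c : Int) : Int := (if a - c ≤ 0 then 1 else 0) - (if a ≤ 0 then 1 else 0)


def pvCW (discount : List String) (i : Nat) (w : String) : Int :=
  (((discount.drop i).take 10).count w : Int)


def pvT (want : List String) (nf : String → Int) (c : String → Int) : Int :=
  (want.length : Int) - ((PySem.Set.ofList want).map (fun w => pvF (nf w) (c w))).sum


def pvStep2 (valid : PySem.Dict String Int) (discount : List String)
    (s : Int × PySem.Dict String Int × Int) (i : Int) : Int × PySem.Dict String Int × Int :=
  let a := if s.2.2 = 0 then s.1 + 1 else s.1
  let x := PySem.List.pyGetD discount i ""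
  let t1 :=
    if valid.getD x 0 ≠ 0 then
      let c := s.2.1.modify x 0 (fun v => v + 1)
      (c, if c.getD x 0 = 1 then s.2.2 + 1 else s.2.2)
    else (s.2.1, s.2.2)
  let y := PySem.List.pyGetD discount (i + 10) ""
  let t2 :=
    if valid.getD y 0 ≠ 0 then
      let c := t1.1.modify y 0 (fun v => v - 1)
      (c, if c.getD y 0 = 0 then t1.2 - 1 else t1.2)
    else t1
  (a, t2.1, t2.2)


theorem pv_cntfold_notmem (l : List (String × Int)) (d : PySem.Dict String Int) (w : String)
    (h : w ∉ l.map Prod.fst) :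
    (l.foldl (fun d p => d.insert p.1 p.2) d).getD w 0 = d.getD w 0 := by
  induction l generalizing d with
  | nil => rfl
  | cons p t ih =>
      simp only [List.map_cons, List.mem_cons, not_or] at h
      simp only [List.foldl_cons]
      rw [ih _ h.2, PySem.Dict.getD_insert_of_ne _ _ _ h.1]


theorem pv_cntfold_nodup (l : List (String × Int)) (d : PySem.Dict String Int)
    (h : (l.map Prod.fst).Nodup) (p : String × Int) (hp : p ∈ l) :
    (l.foldl (fun d p => d.insert p.1 p.2) d).getD p.1 0 = p.2 := by
  induction l generalizing d with
  | nil => cases hp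
  | cons q t ih =>
      simp only [List.map_cons, List.nodup_cons] at h
      simp only [List.foldl_cons]
      rcases List.mem_cons.mp hp with rfl | hmem
      · rw [pv_cntfold_notmem _ _ _ h.1, PySem.Dict.getD_insert_self]
      · exact ih _ h.2 hmem


theorem pv_validfold (l : List (String × Int)) (d : PySem.Dict String Int) (w : String) :
    (l.foldl (fun d p => d.insert p.1 1) d).getD w 0 =
      if w ∈ l.map Prod.fst then 1 else d.getD w 0 := by
  induction l generalizing d with
  | nil => simp
  | cons q t ih =>
      simp only [List.foldl_cons, List.map_cons, List.mem_cons]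
      rw [ih]
      by_cases hw : w ∈ t.map Prod.fst
      · simp [hw]
      · by_cases he : w = q.1
        · simp [hw, he, PySem.Dict.getD_insert_self]
        · simp [hw, he, PySem.Dict.getD_insert_of_ne _ _ _ he]


theorem pv_sum_onepoint (l : List String) (hnd : l.Nodup) (x : String) (hx : x ∈ l)
    (f g : String → Int) (h : ∀ w ∈ l, w ≠ x → g w = f w) :
    (l.map g).sum = (l.map f).sum + (g x - f x) := by
  induction l with
  | nil => cases hx
  | cons a t ih =>
      simp only [List.nodup_cons] at hnd
      simp only [List.map_cons, List.sum_cons]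
      rcases List.mem_cons.mp hx with rfl | hmem
      · have : ∀ w ∈ t, g w = f w := fun w hw => h w (List.mem_cons_of_mem _ hw) (fun e => hnd.1 (e ▸ hw))
        rw [List.map_congr_left this]; ring
      · have ha : a ≠ x := fun e => hnd.1 (e ▸ hmem)
        rw [h a (List.mem_cons_self) ha, ih hnd.2 hmem (fun w hw hne => h w (List.mem_cons_of_mem _ hw) hne)]
        ring


theorem pv_sum_le_length (l : List String) (f : String → Int) (h : ∀ x ∈ l, f x ≤ 1) :
    (l.map f).sum ≤ (l.length : Int) ∧
      ((l.map f).sum = (l.length : Int) ↔ ∀ x ∈ l, f x = 1) := by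
  induction l with
  | nil => simp
  | cons a t ih =>
      have ht := ih (fun x hx => h x (List.mem_cons_of_mem _ hx))
      have ha := h a List.mem_cons_self
      simp only [List.map_cons, List.sum_cons, List.length_cons, List.mem_cons]
      constructor
      · push_cast; omega
      · constructor
        · intro he
          have h1 : f a = 1 ∧ (t.map f).sum = (t.length : Int) := by
            push_cast at he ⊢; omega
          intro x hx
          rcases hx with rfl | hx
          · exact h1.1
          · exact (ht.2.mp h1.2) x hx
        · intro hall
          have : (t.map f).sum = (t.length : Int) := ht.2.mpr (fun x hx => hall x (Or.inr hx))
          rw [hall a (Or.inl rfl), this]; push_cast; ring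


theorem pv_ofList_len (xs : List String) :
    (PySem.Set.ofList xs).length = xs.length ↔ xs.Nodup := by
  constructor
  · intro h
    induction xs with
    | nil => simp
    | cons a t ih =>
        rw [PySem.Set.ofList_cons] at h
        simp only [List.length_cons] at h
        have hd : ((PySem.Set.ofList t).discard a).length ≤ (PySem.Set.ofList t).length :=
          List.length_filter_le _ _
        have ht := PySem.Set.length_ofList_le t
        have hlen : ((PySem.Set.ofList t).discard a).length = t.length := by omega
        have heq : (PySem.Set.ofList t).length = t.length := by omega
        have hnd := ih heq
        refine List.nodup_cons.mpr ⟨?_, hnd⟩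
        intro hmem
        have hmem' : a ∈ PySem.Set.ofList t := (PySem.Set.mem_ofList _ _).mpr hmem
        have : ((PySem.Set.ofList t).discard a).length < (PySem.Set.ofList t).length := by
          apply List.length_filter_lt_length_iff_exists.mpr
          exact ⟨a, hmem', by simp⟩
        omega
  · intro h; rw [PySem.Set.ofList_eq_self_of_nodup _ h]


theorem pv_zip_keys (a : List String) (b : List Int) :
    (a.zip b).map Prod.fst = a.take b.length := by
  induction a generalizing b with
  | nil => simp
  | cons x t ih =>
      cases b with
      | nil => simp
      | cons y s => simp [List.zip_cons_cons, ih]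


theorem pv_take_succ (l : List String) (j : Nat) (h : j < l.length) :
    l.take (j + 1) = l.take j ++ [l[j]] := by
  have := @List.take_succ _ l j
  rw [List.getElem?_eq_getElem h] at this
  simpa using this


theorem pv_pvT_congr (want : List String) (nf c c' : String → Int)
    (h : ∀ w ∈ want, c w = c' w) :
    pvT want nf c = pvT want nf c' := by
  unfold pvT
  congr 1
  refine congrArg List.sum (List.map_congr_left ?_)
  intro w hw
  rw [h w ((PySem.Set.mem_ofList _ _).mp hw)]


theorem pv_pvF_congr_T (want : List String) (nf c c' : String → Int)
    (h : ∀ w ∈ want, pvF (nf w) (c w) = pvF (nf w) (c' w)) :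
    pvT want nf c = pvT want nf c' := by
  unfold pvT
  congr 1
  refine congrArg List.sum (List.map_congr_left ?_)
  intro w hw
  exact h w ((PySem.Set.mem_ofList _ _).mp hw)


theorem pv_window_head (discount : List String) (i : Nat) (h : i < discount.length) :
    (discount.drop i).take 10 = discount[i] :: (discount.drop (i + 1)).take 9 := by
  rw [List.drop_eq_getElem_cons h]
  rfl


theorem pv_window_last (discount : List String) (i : Nat) (h : i + 10 < discount.length) :
    (discount.drop (i + 1)).take 10 = (discount.drop (i + 1)).take 9 ++ [discount[i + 10]] := by
  have h9 : (discount.drop (i + 1))[9]? = some discount[i + 10] := by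
    rw [List.getElem?_drop]
    exact List.getElem?_eq_getElem (by omega)
  have := @List.take_succ _ (discount.drop (i+1)) 9
  rw [h9] at this
  simpa using this


theorem pv_loop1 (want discount : List String) (cnt0 : PySem.Dict String Int)
    (hL : 10 ≤ discount.length) (j : Nat) (hjL : j ≤ discount.length) :
    (∀ w ∈ want,
      ((PySem.List.pyRange 0 (j:Int) 1).foldl
        (fun (s : PySem.Dict String Int × Int) i =>
          let x := PySem.List.pyGetD discount i ""
          if x ∈ want then
            let c := s.1.modify x 0 (fun v => v - 1)
            (c, if c.getD x 0 = 0 then s.2 - 1 else s.2)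
          else s) (cnt0, (want.length:Int))).1.getD w 0
        = cnt0.getD w 0 - ((discount.take j).count w : Int)) ∧
    ((PySem.List.pyRange 0 (j:Int) 1).foldl
        (fun (s : PySem.Dict String Int × Int) i =>
          let x := PySem.List.pyGetD discount i ""
          if x ∈ want then
            let c := s.1.modify x 0 (fun v => v - 1)
            (c, if c.getD x 0 = 0 then s.2 - 1 else s.2)
          else s) (cnt0, (want.length:Int))).2
      = pvT want (fun w => cnt0.getD w 0) (fun w => ((discount.take j).count w : Int)) := by
  induction j with
  | zero =>
      rw [show ((0:Nat):Int) = 0 from rfl, PySem.List.pyRange_one_eq_nil (by omega)]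
      constructor
      · intro w _; simp
      · simp only [List.foldl_nil]
        unfold pvT
        have : ((PySem.Set.ofList want).map
            (fun w => pvF (cnt0.getD w 0) (((discount.take 0).count w : Nat) : Int))).sum = 0 := by
          apply List.sum_eq_zero
          intro v hv
          simp only [List.mem_map] at hv
          obtain ⟨w, _, rfl⟩ := hv
          simp [pvF]
        rw [this]; ring
  | succ j ih =>
      have hj : j ≤ discount.length := by omega
      have hjlt : j < discount.length := by omega
      obtain ⟨ihc, iht⟩ := ih hj
      have hsplit : PySem.List.pyRange 0 ((j+1:Nat):Int) 1
          = PySem.List.pyRange 0 (j:Nat) 1 ++ [(j:Int)] := by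
        push_cast
        exact PySem.List.pyRange_one_succ_right (by omega)
      rw [hsplit, List.foldl_append]
      set S := (PySem.List.pyRange 0 (j:Int) 1).foldl
        (fun (s : PySem.Dict String Int × Int) i =>
          let x := PySem.List.pyGetD discount i ""
          if x ∈ want then
            let c := s.1.modify x 0 (fun v => v - 1)
            (c, if c.getD x 0 = 0 then s.2 - 1 else s.2)
          else s) (cnt0, (want.length:Int)) with hS
      simp only [List.foldl_cons, List.foldl_nil]
      have hx : PySem.List.pyGetD discount (j:Int) "" = discount[j] := by
        rw [PySem.List.pyGetD_natCast]
        exact List.getD_eq_getElem _ _ hjlt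
      rw [hx]
      have htk := pv_take_succ discount j hjlt
      by_cases hmem : discount[j] ∈ want
      · simp only [hmem, if_true]
        have hcnt : ∀ w ∈ want,
            (S.1.modify discount[j] 0 (fun v => v - 1)).getD w 0
              = cnt0.getD w 0 - ((discount.take (j+1)).count w : Int) := by
          intro w hw
          rw [PySem.Dict.getD_modify]
          by_cases hwx : w = discount[j]
          · subst hwx
            rw [if_pos rfl, ihc _ hw, htk, List.count_append]
            push_cast
            simp
            ring
          · rw [if_neg hwx, ihc w hw, htk, List.count_append]
            have : [discount[j]].count w = 0 := by
              simp [List.count_singleton]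
              exact fun e => hwx e.symm
            rw [this]
            simp
        refine ⟨fun w hw => hcnt w hw, ?_⟩
        rw [hcnt discount[j] hmem, iht]
        have hxW : discount[j] ∈ PySem.Set.ofList want := (PySem.Set.mem_ofList _ _).mpr hmem
        have hne : ∀ w ∈ PySem.Set.ofList want, w ≠ discount[j] →
            (fun w => pvF (cnt0.getD w 0) (((discount.take (j+1)).count w : Nat) : Int)) w
              = (fun w => pvF (cnt0.getD w 0) (((discount.take j).count w : Nat) : Int)) w := by
          intro w _ hwx
          have hcw : (discount.take (j+1)).count w = (discount.take j).count w := by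
            rw [htk, List.count_append]
            have : [discount[j]].count w = 0 := by
              simp [List.count_singleton]
              exact fun e => hwx e.symm
            omega
          dsimp only
          rw [hcw]
        have hsum := pv_sum_onepoint (PySem.Set.ofList want) (PySem.Set.nodup_ofList _)
          discount[j] hxW
          (fun w => pvF (cnt0.getD w 0) (((discount.take j).count w : Nat) : Int))
          (fun w => pvF (cnt0.getD w 0) (((discount.take (j+1)).count w : Nat) : Int))
          hne
        have hcx : (discount.take (j+1)).count discount[j]
            = (discount.take j).count discount[j] + 1 := by
          rw [htk, List.count_append]
          simp
        unfold pvT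
        rw [hsum, hcx]
        set a := cnt0.getD discount[j] 0
        set c := ((discount.take j).count discount[j] : Int)
        have hc0 : 0 ≤ c := by positivity
        push_cast
        unfold pvF
        split_ifs <;> omega
      · simp only [hmem, if_false]
        refine ⟨?_, ?_⟩
        · intro w hw
          rw [ihc w hw, htk, List.count_append]
          have : [discount[j]].count w = 0 := by
            simp [List.count_singleton]
            exact fun e => hmem (e ▸ hw)
          rw [this]
          simp
        · rw [iht]
          apply pv_pvT_congr
          intro w hw
          rw [htk, List.count_append]
          have : [discount[j]].count w = 0 := by
            simp [List.count_singleton]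
            exact fun e => hmem (e ▸ hw)
          rw [this]
          simp


theorem pv_loop2 (want discount ks : List String) (nf : String → Int)
    (valid : PySem.Dict String Int)
    (hks : ∀ w ∈ ks, w ∈ want)
    (hnf0 : ∀ w, w ∉ ks → nf w = 0)
    (hvalid : ∀ w, valid.getD w 0 = if w ∈ ks then 1 else 0)
    (hL : 10 ≤ discount.length)
    (d0 : PySem.Dict String Int)
    (hd0 : ∀ w ∈ ks, d0.getD w 0 = nf w - pvCW discount 0 w)
    (i : Nat) (hi : i ≤ discount.length - 10) :
    ((((PySem.List.pyRange 0 (i:Int) 1).foldl (pvStep2 valid discount)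
        (0, d0, pvT want nf (pvCW discount 0))).1
      = (((List.range i).countP (fun j => decide (pvT want nf (pvCW discount j) = 0)) : Nat) : Int))
    ∧ (∀ w ∈ ks,
        ((PySem.List.pyRange 0 (i:Int) 1).foldl (pvStep2 valid discount)
          (0, d0, pvT want nf (pvCW discount 0))).2.1.getD w 0
          = nf w - pvCW discount i w)
    ∧ (((PySem.List.pyRange 0 (i:Int) 1).foldl (pvStep2 valid discount)
        (0, d0, pvT want nf (pvCW discount 0))).2.2
      = pvT want nf (pvCW discount i))) := by
  induction i with
  | zero =>
      rw [show ((0:Nat):Int) = 0 from rfl, PySem.List.pyRange_one_eq_nil (by omega)]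
      exact ⟨rfl, fun w hw => hd0 w hw, rfl⟩
  | succ i ih =>
      have hi' : i ≤ discount.length - 10 := by omega
      have hiL : i < discount.length := by omega
      have hi10 : i + 10 < discount.length := by omega
      obtain ⟨iha, ihc, iht⟩ := ih hi'
      have hsplit : PySem.List.pyRange 0 ((i+1:Nat):Int) 1
          = PySem.List.pyRange 0 (i:Nat) 1 ++ [(i:Int)] := by
        push_cast
        exact PySem.List.pyRange_one_succ_right (by omega)
      rw [hsplit, List.foldl_append]
      set S := (PySem.List.pyRange 0 (i:Int) 1).foldl (pvStep2 valid discount)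
        (0, d0, pvT want nf (pvCW discount 0)) with hS
      simp only [List.foldl_cons, List.foldl_nil, pvStep2]
      have hx : PySem.List.pyGetD discount (i:Int) "" = discount[i] := by
        rw [PySem.List.pyGetD_natCast]
        exact List.getD_eq_getElem _ _ hiL
      have hy : PySem.List.pyGetD discount ((i:Int) + 10) "" = discount[i+10] := by
        rw [show ((i:Int) + 10) = ((i + 10 : Nat) : Int) by push_cast; ring,
          PySem.List.pyGetD_natCast]
        exact List.getD_eq_getElem _ _ hi10
      rw [hx, hy]
      have hans : (if S.2.2 = 0 then S.1 + 1 else S.1)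
          = (((List.range (i+1)).countP
              (fun j => decide (pvT want nf (pvCW discount j) = 0)) : Nat) : Int) := by
        rw [List.range_succ, List.countP_append, iht, iha]
        by_cases ht0 : pvT want nf (pvCW discount i) = 0
        · simp [ht0]
        · simp [ht0]
      have hheadC : ∀ w, pvCW discount i w
          = (if w = discount[i] then 1 else 0) + (((discount.drop (i+1)).take 9).count w : Int) := by
        intro w
        unfold pvCW
        rw [pv_window_head discount i hiL]
        by_cases hw : w = discount[i]
        · subst hw
          rw [if_pos rfl, List.count_cons_self]
          push_cast
          ring
        · rw [if_neg hw]
          have h1 : (discount[i] :: (discount.drop (i+1)).take 9).count w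
              = ((discount.drop (i+1)).take 9).count w := by
            rw [List.count_cons]
            have h2 : (discount[i] == w) = false := by
              simp only [beq_eq_false_iff_ne, ne_eq]
              exact fun e => hw e.symm
            rw [h2]
            simp
          rw [h1]
          push_cast
          ring
      have hlastC : ∀ w, pvCW discount (i+1) w
          = (((discount.drop (i+1)).take 9).count w : Int) + (if w = discount[i+10] then 1 else 0) := by
        intro w
        unfold pvCW
        rw [pv_window_last discount i hi10, List.count_append]
        by_cases hw : w = discount[i+10]
        · subst hw
          rw [if_pos rfl]
          have h1 : [discount[i+10]].count discount[i+10] = 1 := by simp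
          rw [h1]
          push_cast
          ring
        · rw [if_neg hw]
          have h1 : [discount[i+10]].count w = 0 := by
            rw [List.count_eq_zero]
            simp [hw]
          rw [h1]
          push_cast
          ring
      have hcm0 : ∀ w, (0:Int) ≤ (((discount.drop (i+1)).take 9).count w : Int) :=
        fun w => by positivity
      have hcw0 : ∀ j w, 0 ≤ pvCW discount j w := fun j w => by unfold pvCW; positivity
      have hsub1 :
          (∀ w ∈ ks,
            (if valid.getD discount[i] 0 ≠ 0 then
              ((S.2.1.modify discount[i] 0 (fun v => v + 1)),
               (if (S.2.1.modify discount[i] 0 (fun v => v + 1)).getD discount[i] 0 = 1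
                then S.2.2 + 1 else S.2.2))
            else (S.2.1, S.2.2)).1.getD w 0 = nf w - (((discount.drop (i+1)).take 9).count w : Int))
          ∧ (if valid.getD discount[i] 0 ≠ 0 then
              ((S.2.1.modify discount[i] 0 (fun v => v + 1)),
               (if (S.2.1.modify discount[i] 0 (fun v => v + 1)).getD discount[i] 0 = 1
                then S.2.2 + 1 else S.2.2))
            else (S.2.1, S.2.2)).2 = pvT want nf (fun w => (((discount.drop (i+1)).take 9).count w : Int)) := by
        by_cases hxk : discount[i] ∈ ks
        · have hg : valid.getD discount[i] 0 ≠ 0 := by rw [hvalid]; simp [hxk]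
          rw [if_pos hg]
          have hmidc : ∀ w ∈ ks,
              (S.2.1.modify discount[i] 0 (fun v => v + 1)).getD w 0 = nf w - (((discount.drop (i+1)).take 9).count w : Int) := by
            intro w hw
            rw [PySem.Dict.getD_modify]
            by_cases hwx : w = discount[i]
            · subst hwx
              rw [if_pos rfl, ihc _ hw, hheadC]
              rw [if_pos rfl]
              ring
            · rw [if_neg hwx, ihc w hw, hheadC]
              simp [hwx]
          refine ⟨fun w hw => hmidc w hw, ?_⟩
          rw [hmidc _ hxk, iht]
          have hxW : discount[i] ∈ PySem.Set.ofList want :=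
            (PySem.Set.mem_ofList _ _).mpr (hks _ hxk)
          have hne : ∀ w ∈ PySem.Set.ofList want, w ≠ discount[i] →
              (fun w => pvF (nf w) (((discount.drop (i+1)).take 9).count w : Int)) w = (fun w => pvF (nf w) (pvCW discount i w)) w := by
            intro w _ hwx
            dsimp only
            rw [hheadC w, if_neg hwx, zero_add]
          have hsum := pv_sum_onepoint (PySem.Set.ofList want) (PySem.Set.nodup_ofList _)
            discount[i] hxW
            (fun w => pvF (nf w) (pvCW discount i w))
            (fun w => pvF (nf w) (((discount.drop (i+1)).take 9).count w : Int)) hne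
          unfold pvT
          rw [hsum]
          dsimp only
          have hcwx : pvCW discount i discount[i] = 1 + (((discount.drop (i+1)).take 9).count discount[i] : Int) := by
            rw [hheadC]; simp
          rw [hcwx]
          have := hcm0 discount[i]
          set a := nf discount[i]
          set c := (((discount.drop (i+1)).take 9).count discount[i] : Int)
          unfold pvF
          split_ifs <;> omega
        · have hg : ¬ (valid.getD discount[i] 0 ≠ 0) := by rw [hvalid]; simp [hxk]
          rw [if_neg hg]
          refine ⟨?_, ?_⟩
          · intro w hw
            rw [ihc w hw, hheadC]
            have hwx : w ≠ discount[i] := fun e => hxk (e ▸ hw)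
            simp [hwx]
          · rw [iht]
            apply pv_pvF_congr_T
            intro w hw
            by_cases hwx : w = discount[i]
            · subst hwx
              rw [hnf0 _ hxk]
              have h1 := hcm0 discount[i]
              have h2 := hcw0 i discount[i]
              unfold pvF
              split_ifs <;> omega
            · rw [hheadC w, if_neg hwx, zero_add]
      obtain ⟨hm1, hm2⟩ := hsub1
      set T1 := (if valid.getD discount[i] 0 ≠ 0 then
              ((S.2.1.modify discount[i] 0 (fun v => v + 1)),
               (if (S.2.1.modify discount[i] 0 (fun v => v + 1)).getD discount[i] 0 = 1
                then S.2.2 + 1 else S.2.2))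
            else (S.2.1, S.2.2)) with hT1
      have hsub2 :
          (∀ w ∈ ks,
            (if valid.getD discount[i+10] 0 ≠ 0 then
              ((T1.1.modify discount[i+10] 0 (fun v => v - 1)),
               (if (T1.1.modify discount[i+10] 0 (fun v => v - 1)).getD discount[i+10] 0 = 0
                then T1.2 - 1 else T1.2))
            else T1).1.getD w 0 = nf w - pvCW discount (i+1) w)
          ∧ (if valid.getD discount[i+10] 0 ≠ 0 then
              ((T1.1.modify discount[i+10] 0 (fun v => v - 1)),
               (if (T1.1.modify discount[i+10] 0 (fun v => v - 1)).getD discount[i+10] 0 = 0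
                then T1.2 - 1 else T1.2))
            else T1).2 = pvT want nf (pvCW discount (i+1)) := by
        by_cases hyk : discount[i+10] ∈ ks
        · have hg : valid.getD discount[i+10] 0 ≠ 0 := by rw [hvalid]; simp [hyk]
          rw [if_pos hg]
          have hmidc : ∀ w ∈ ks,
              (T1.1.modify discount[i+10] 0 (fun v => v - 1)).getD w 0
                = nf w - pvCW discount (i+1) w := by
            intro w hw
            rw [PySem.Dict.getD_modify]
            by_cases hwy : w = discount[i+10]
            · subst hwy
              rw [if_pos rfl, hm1 _ hw, hlastC]
              simp
              ring
            · rw [if_neg hwy, hm1 w hw, hlastC]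
              simp [hwy]
          refine ⟨fun w hw => hmidc w hw, ?_⟩
          rw [hmidc _ hyk, hm2]
          have hyW : discount[i+10] ∈ PySem.Set.ofList want :=
            (PySem.Set.mem_ofList _ _).mpr (hks _ hyk)
          have hne : ∀ w ∈ PySem.Set.ofList want, w ≠ discount[i+10] →
              (fun w => pvF (nf w) (pvCW discount (i+1) w)) w = (fun w => pvF (nf w) (((discount.drop (i+1)).take 9).count w : Int)) w := by
            intro w _ hwy
            dsimp only
            rw [hlastC w, if_neg hwy, add_zero]
          have hsum := pv_sum_onepoint (PySem.Set.ofList want) (PySem.Set.nodup_ofList _)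
            discount[i+10] hyW
            (fun w => pvF (nf w) (((discount.drop (i+1)).take 9).count w : Int))
            (fun w => pvF (nf w) (pvCW discount (i+1) w)) hne
          unfold pvT
          rw [hsum]
          dsimp only
          have hcwy : pvCW discount (i+1) discount[i+10] = (((discount.drop (i+1)).take 9).count discount[i+10] : Int) + 1 := by
            rw [hlastC]; simp
          rw [hcwy]
          have := hcm0 discount[i+10]
          set a := nf discount[i+10]
          set c := (((discount.drop (i+1)).take 9).count discount[i+10] : Int)
          unfold pvF
          split_ifs <;> omega
        · have hg : ¬ (valid.getD discount[i+10] 0 ≠ 0) := by rw [hvalid]; simp [hyk]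
          rw [if_neg hg]
          refine ⟨?_, ?_⟩
          · intro w hw
            rw [hm1 w hw, hlastC]
            have hwy : w ≠ discount[i+10] := fun e => hyk (e ▸ hw)
            simp [hwy]
          · rw [hm2]
            apply pv_pvF_congr_T
            intro w hw
            by_cases hwy : w = discount[i+10]
            · subst hwy
              rw [hnf0 _ hyk]
              have h1 := hcm0 discount[i+10]
              have h2 := hcw0 (i+1) discount[i+10]
              unfold pvF
              split_ifs <;> omega
            · rw [hlastC w, if_neg hwy, add_zero]
      obtain ⟨hf1, hf2⟩ := hsub2
      exact ⟨hans, hf1, hf2⟩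


theorem pv_T_zero_iff (want : List String) (number : List Int) (c : String → Int)
    (hc : ∀ w, 0 ≤ c w) :
    pvT want
      (fun w => ((want.zip number).foldl (fun d p => d.insert p.1 p.2) PySem.Dict.empty).getD w 0)
      c = 0 ↔
      (((want.zip number).length = want.length
        ∧ (PySem.Set.ofList want).length = want.length
        ∧ ∀ p ∈ want.zip number, 1 ≤ p.2)
       ∧ ∀ p ∈ want.zip number, p.2 ≤ c p.1) := by
  set cnt0 := (want.zip number).foldl (fun d p => d.insert p.1 p.2) PySem.Dict.empty with hcnt0
  set nf : String → Int := fun w => cnt0.getD w 0 with hnf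
  have hterm : ∀ w ∈ PySem.Set.ofList want, (fun w => pvF (nf w) (c w)) w ≤ 1 := by
    intro w _
    dsimp only
    have := hc w
    unfold pvF
    split_ifs <;> omega
  have hlenW := PySem.Set.length_ofList_le want
  obtain ⟨hle, hiff⟩ := pv_sum_le_length (PySem.Set.ofList want) (fun w => pvF (nf w) (c w)) hterm
  have hstep1 : pvT want nf c = 0 ↔
      ((PySem.Set.ofList want).length = want.length
        ∧ ∀ w ∈ PySem.Set.ofList want, pvF (nf w) (c w) = 1) := by
    unfold pvT
    constructor
    · intro h0
      have hsum : ((PySem.Set.ofList want).map (fun w => pvF (nf w) (c w))).sum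
          = (want.length : Int) := by omega
      have hWl : (PySem.Set.ofList want).length = want.length := by
        have : ((PySem.Set.ofList want).length : Int) ≤ (want.length : Int) := by
          exact_mod_cast hlenW
        omega
      exact ⟨hWl, hiff.mp (by rw [hsum, hWl])⟩
    · intro ⟨hWl, hall⟩
      have := hiff.mpr hall
      rw [this, hWl]
      ring
  rw [hstep1]
  constructor
  · intro ⟨hWl, hall⟩
    have hnd : want.Nodup := (pv_ofList_len want).mp hWl
    have hW : PySem.Set.ofList want = want := PySem.Set.ofList_eq_self_of_nodup _ hnd
    rw [hW] at hall
    have hks : (want.zip number).map Prod.fst = want.take number.length := pv_zip_keys _ _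
    have hlen : want.length ≤ number.length := by
      by_contra hlt
      push_neg at hlt
      have hdne : want.drop number.length ≠ [] := by
        intro he
        have := List.length_drop (l := want) (i := number.length)
        rw [he] at this
        simp at this
        omega
      set w0 := (want.drop number.length).head hdne with hw0
      have hw0drop : w0 ∈ want.drop number.length := List.head_mem hdne
      have hw0mem : w0 ∈ want := List.mem_of_mem_drop hw0drop
      have hdisj : List.Disjoint (want.take number.length) (want.drop number.length) := by
        apply List.disjoint_of_nodup_append
        rw [List.take_append_drop]
        exact hnd
      have hw0nk : w0 ∉ (want.zip number).map Prod.fst := by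
        rw [hks]
        intro hin
        exact hdisj hin hw0drop
      have hnf0 : nf w0 = 0 := by
        rw [hnf]
        dsimp only
        rw [hcnt0, pv_cntfold_notmem _ _ _ hw0nk]
        simp
      have := hall w0 hw0mem
      rw [hnf0] at this
      have := hc w0
      unfold pvF at *
      split_ifs at * <;> omega
    have htk : want.take number.length = want := List.take_of_length_le hlen
    have hksw : (want.zip number).map Prod.fst = want := by rw [hks, htk]
    have hksnd : ((want.zip number).map Prod.fst).Nodup := by rw [hksw]; exact hnd
    have hplen : (want.zip number).length = want.length := by
      rw [List.length_zip]; omega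
    have hvals : ∀ p ∈ want.zip number, nf p.1 = p.2 := by
      intro p hp
      rw [hnf]
      dsimp only
      rw [hcnt0]
      exact pv_cntfold_nodup _ _ hksnd p hp
    have hforall : ∀ p ∈ want.zip number, 1 ≤ p.2 ∧ p.2 ≤ c p.1 := by
      intro p hp
      have hmemw : p.1 ∈ want := (List.of_mem_zip hp).1
      have h1 := hall p.1 hmemw
      rw [hvals p hp] at h1
      have := hc p.1
      unfold pvF at h1
      split_ifs at h1 <;> omega
    exact ⟨⟨hplen, hWl, fun p hp => (hforall p hp).1⟩, fun p hp => (hforall p hp).2⟩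
  · intro ⟨⟨hplen, hWl, hpos⟩, hwin⟩
    have hnd : want.Nodup := (pv_ofList_len want).mp hWl
    have hW : PySem.Set.ofList want = want := PySem.Set.ofList_eq_self_of_nodup _ hnd
    rw [hW]
    refine ⟨rfl, ?_⟩
    intro w hw
    have hlen : want.length ≤ number.length := by
      rw [List.length_zip] at hplen; omega
    have hksw : (want.zip number).map Prod.fst = want := by
      rw [pv_zip_keys, List.take_of_length_le hlen]
    have hksnd : ((want.zip number).map Prod.fst).Nodup := by rw [hksw]; exact hnd
    have hwk : w ∈ (want.zip number).map Prod.fst := by rw [hksw]; exact hw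
    obtain ⟨p, hp, hpe⟩ := List.mem_map.mp hwk
    have hval : nf w = p.2 := by
      rw [← hpe, hnf]
      dsimp only
      rw [hcnt0]
      exact pv_cntfold_nodup _ _ hksnd p hp
    have h1 := hpos p hp
    have h2 := hwin p hp
    rw [hpe] at h2
    rw [hval]
    have := hc w
    unfold pvF
    split_ifs <;> omega


theorem pv_stocked_iff (want : List String) (number : List Int) (c : String → Int) :
    ((PySem.Set.ofList (((want.zip number).filter
        (fun p => decide (0 < p.2 ∧ p.2 ≤ c p.1))).map Prod.fst)).length = want.length)
    ↔ (((want.zip number).length = want.length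
        ∧ (PySem.Set.ofList want).length = want.length
        ∧ ∀ p ∈ want.zip number, 1 ≤ p.2)
       ∧ ∀ p ∈ want.zip number, p.2 ≤ c p.1) := by
  set l := want.zip number with hl
  set F := l.filter (fun p => decide (0 < p.2 ∧ p.2 ≤ c p.1)) with hFdef
  set ks := F.map Prod.fst with hksdef
  have h1 : (PySem.Set.ofList ks).length ≤ ks.length := PySem.Set.length_ofList_le ks
  have h2 : ks.length = F.length := by rw [hksdef, List.length_map]
  have h3 : F.length ≤ l.length := List.length_filter_le _ _
  have h4 : l.length ≤ want.length := by rw [hl, List.length_zip]; omega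
  constructor
  · intro h
    have hF1 : (l.filter (fun p => decide (0 < p.2 ∧ p.2 ≤ c p.1))).length = l.length := by
      rw [← hFdef]; omega
    have hall : ∀ p ∈ l, 1 ≤ p.2 ∧ p.2 ≤ c p.1 := by
      have hh := List.length_filter_eq_length_iff.mp hF1
      intro p hp
      have := hh p hp
      simp only [decide_eq_true_eq] at this
      omega
    have hFl : F = l := by
      rw [hFdef]
      apply List.filter_eq_self.mpr
      intro p hp
      simp only [decide_eq_true_eq]
      have := hall p hp
      omega
    have hllen : l.length = want.length := by omega
    have hnumlen : want.length ≤ number.length := by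
      rw [hl, List.length_zip] at hllen; omega
    have hkw : ks = want := by
      rw [hksdef, hFl, hl, pv_zip_keys, List.take_of_length_le hnumlen]
    have hnd : want.Nodup := by
      have : (PySem.Set.ofList ks).length = ks.length := by omega
      rw [hkw] at this
      exact (pv_ofList_len want).mp this
    refine ⟨⟨hllen, ?_, fun p hp => (hall p hp).1⟩, fun p hp => (hall p hp).2⟩
    rw [PySem.Set.ofList_eq_self_of_nodup _ hnd]
  · intro ⟨⟨hllen, hWl, hpos⟩, hwin⟩
    have hnd : want.Nodup := (pv_ofList_len want).mp hWl
    have hnumlen : want.length ≤ number.length := by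
      rw [hl, List.length_zip] at hllen; omega
    have hFl : F = l := by
      rw [hFdef]
      apply List.filter_eq_self.mpr
      intro p hp
      simp only [decide_eq_true_eq]
      exact ⟨by have := hpos p hp; omega, hwin p hp⟩
    have hkw : ks = want := by
      rw [hksdef, hFl, hl, pv_zip_keys, List.take_of_length_le hnumlen]
    rw [hkw, PySem.Set.ofList_eq_self_of_nodup _ hnd]


theorem pv_main (want : List String) (number : List Int) (discount : List String)
    (hL10 : 10 ≤ discount.length) :
    solution want number discount = solution_alt want number discount := by
  unfold solution solution_alt
  dsimp only
  have hinit : (want.zip number).foldl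
      (fun (s : PySem.Dict String Int × PySem.Dict String Int) p =>
        (s.1.insert p.1 p.2, s.2.insert p.1 1))
      (PySem.Dict.empty, PySem.Dict.empty)
      = ((want.zip number).foldl (fun d p => d.insert p.1 p.2) PySem.Dict.empty,
         (want.zip number).foldl (fun d p => d.insert p.1 1) PySem.Dict.empty) :=
    PySem.List.foldl_prod_mk
      (f := fun (d : PySem.Dict String Int) (p : String × Int) => d.insert p.1 p.2)
      (g := fun (d : PySem.Dict String Int) (p : String × Int) => d.insert p.1 1)
      (want.zip number) PySem.Dict.empty PySem.Dict.empty
  rw [hinit]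
  dsimp only
  simp only [PySem.List.len_eq]
  set cnt0 := (want.zip number).foldl (fun d p => d.insert p.1 p.2) PySem.Dict.empty with hcnt0
  set valid0 := (want.zip number).foldl (fun (d : PySem.Dict String Int) (p : String × Int) => d.insert p.1 1) PySem.Dict.empty with hvalid0
  set nf : String → Int := fun w => cnt0.getD w 0 with hnf
  set ks := (want.zip number).map Prod.fst with hks
  have hb10 : ((discount.length : Int) - 10) = ((discount.length - 10 : Nat) : Int) := by omega
  have hb9 : ((discount.length : Int) - 9) = ((discount.length - 9 : Nat) : Int) := by omega
  rw [hb10, hb9]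
  obtain ⟨l1c, l1t⟩ := pv_loop1 want discount cnt0 hL10 10 (by omega)
  rw [show (((10:Nat)):Int) = (10:Int) from by norm_num] at l1c l1t
  have hcw0 : (fun w => ((discount.take 10).count w : Int)) = pvCW discount 0 := by
    funext w
    unfold pvCW
    rw [List.drop_zero]
  rw [hcw0] at l1t
  dsimp only at l1c l1t
  rw [l1t]
  have hksw : ∀ w ∈ ks, w ∈ want := by
    intro w hw
    rw [hks, pv_zip_keys] at hw
    exact List.mem_of_mem_take hw
  have hnf0 : ∀ w, w ∉ ks → nf w = 0 := by
    intro w hw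
    rw [hnf]
    dsimp only
    rw [hcnt0, pv_cntfold_notmem _ _ _ hw]
    simp
  have hvalid : ∀ w, valid0.getD w 0 = if w ∈ ks then 1 else 0 := by
    intro w
    rw [hvalid0, pv_validfold]
    split_ifs <;> simp
  have hd0 : ∀ w ∈ ks,
      ((PySem.List.pyRange 0 10 1).foldl
        (fun (s : PySem.Dict String Int × Int) i =>
          let x := PySem.List.pyGetD discount i ""
          if x ∈ want then
            let c := s.1.modify x 0 (fun v => v - 1)
            (c, if c.getD x 0 = 0 then s.2 - 1 else s.2)
          else s) (cnt0, (want.length:Int))).1.getD w 0 = nf w - pvCW discount 0 w := by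
    intro w hw
    rw [l1c w (hksw w hw)]
    unfold pvCW
    rw [List.drop_zero]
  obtain ⟨l2a, l2c, l2t⟩ := pv_loop2 want discount ks nf valid0 hksw hnf0 hvalid hL10 _ hd0
    (discount.length - 10) (le_refl _)
  suffices h :
      (if ((PySem.List.pyRange 0 ((discount.length - 10 : Nat) : Int) 1).foldl
            (pvStep2 valid0 discount)
            (0,
              ((PySem.List.pyRange 0 10 1).foldl
                (fun (s : PySem.Dict String Int × Int) i =>
                  let x := PySem.List.pyGetD discount i ""
                  if x ∈ want then
                    let c := s.1.modify x 0 (fun v => v - 1)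
                    (c, if c.getD x 0 = 0 then s.2 - 1 else s.2)
                  else s) (cnt0, (want.length:Int))).1,
              pvT want nf (pvCW discount 0))).2.2 = 0
        then ((PySem.List.pyRange 0 ((discount.length - 10 : Nat) : Int) 1).foldl
            (pvStep2 valid0 discount)
            (0,
              ((PySem.List.pyRange 0 10 1).foldl
                (fun (s : PySem.Dict String Int × Int) i =>
                  let x := PySem.List.pyGetD discount i ""
                  if x ∈ want then
                    let c := s.1.modify x 0 (fun v => v - 1)
                    (c, if c.getD x 0 = 0 then s.2 - 1 else s.2)
                  else s) (cnt0, (want.length:Int))).1,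
              pvT want nf (pvCW discount 0))).1 + 1
        else ((PySem.List.pyRange 0 ((discount.length - 10 : Nat) : Int) 1).foldl
            (pvStep2 valid0 discount)
            (0,
              ((PySem.List.pyRange 0 10 1).foldl
                (fun (s : PySem.Dict String Int × Int) i =>
                  let x := PySem.List.pyGetD discount i ""
                  if x ∈ want then
                    let c := s.1.modify x 0 (fun v => v - 1)
                    (c, if c.getD x 0 = 0 then s.2 - 1 else s.2)
                  else s) (cnt0, (want.length:Int))).1,
              pvT want nf (pvCW discount 0))).1)
      = (PySem.List.pyRange 0 ((discount.length - 9 : Nat) : Int) 1).foldl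
          (fun days i =>
            if ((PySem.Set.ofList (((want.zip number).filter
                (fun p => decide (0 < p.2 ∧ p.2 ≤ ((PySem.List.slice discount (some i) (some (i + 10))).count p.1 : Int)))).map Prod.fst)).length : Int)
                = (want.length : Int) then days + 1 else days)
          0 by exact h
  rw [l2t, l2a]
  have hstepA : (if pvT want nf (pvCW discount (discount.length - 10)) = 0
      then (((List.range (discount.length - 10)).countP
            (fun j => decide (pvT want nf (pvCW discount j) = 0)) : Nat) : Int) + 1
      else (((List.range (discount.length - 10)).countP
            (fun j => decide (pvT want nf (pvCW discount j) = 0)) : Nat) : Int))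
      = (((List.range (discount.length - 9)).countP
            (fun j => decide (pvT want nf (pvCW discount j) = 0)) : Nat) : Int) := by
    have h9 : discount.length - 9 = (discount.length - 10) + 1 := by omega
    rw [h9, List.range_succ, List.countP_append]
    by_cases h0 : pvT want nf (pvCW discount (discount.length - 10)) = 0
    · simp [h0]
    · simp [h0]
  rw [hstepA]
  have hcnonneg : ∀ (k : Nat) (w : String), 0 ≤ pvCW discount k w := by
    intro k w
    unfold pvCW
    positivity
  rw [PySem.List.pyRange_one]
  simp only [Int.sub_zero, Int.toNat_natCast, zero_add]
  rw [PySem.List.foldl_ite_add_one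
    (p := fun (i : Int) =>
      ((PySem.Set.ofList (((want.zip number).filter
        (fun p => decide (0 < p.2 ∧ p.2 ≤ ((PySem.List.slice discount (some i) (some (i + 10))).count p.1 : Int)))).map Prod.fst)).length : Int)
        = (want.length : Int))]
  rw [zero_add, List.countP_map]
  simp only [Function.comp_def]
  have hcong : (List.range (discount.length - 9)).countP
        (fun j => decide (pvT want nf (pvCW discount j) = 0))
      = (List.range (discount.length - 9)).countP
        (fun (k : Nat) => decide
          (((PySem.Set.ofList (((want.zip number).filter
            (fun p => decide (0 < p.2 ∧ p.2 ≤ ((PySem.List.slice discount (some ((k:Nat):Int)) (some (((k:Nat):Int) + 10))).count p.1 : Int)))).map Prod.fst)).length : Int)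
            = (want.length : Int))) := by
    apply List.countP_congr
    intro k _
    simp only [decide_eq_true_eq]
    have hslice : PySem.List.slice discount (some (k:Int)) (some ((k:Int) + 10))
        = (discount.drop k).take 10 := by
      have h10 : ((k:Int) + 10) = ((k:Int) + ((10:Nat):Int)) := by norm_num
      rw [h10, PySem.List.slice_natCast_add]
    rw [hslice]
    rw [Nat.cast_inj]
    rw [hnf, hcnt0]
    rw [pv_T_zero_iff want number (pvCW discount k) (hcnonneg k)]
    rw [pv_stocked_iff want number (fun w => (((discount.drop k).take 10).count w : Int))]
    unfold pvCW
    rfl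
  rw [hcong]

-- ===== VERDICT (by name: the statement is the Claim_ definition above) =====
theorem solution_spec : Claim_equal_solution := by
  intro want number discount _hdom hpre
  unfold Pre_solution at hpre
  simp only [PySem.List.len_eq] at hpre
  unfold Spec_solution
  exact pv_main want number discount (by omega)
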